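-- pv_equiv track=rewrite | github.com/kalituma/senj | core/graph/graph_query.py | find_path_duplicates
-- ===== SOURCE A (Python) =====
-- def find_path_duplicates(paths):
--     result = []
--     max_length = max(len(path) for path in paths)
--
--     for length in range(1, max_length + 1):
--         dup_dict = {}
--         for i, path in enumerate(paths):
--             if len(path) >= length:
--                 key = tuple(path[:length])
--                 if key not in dup_dict:
--                     dup_dict[key] = []
--                 dup_dict[key].append(i)
--
--         for key, rows in dup_dict.items():
--             if len(rows) > 1:
--                 result.append({
--                     'dup': list(key),
--                     'row': rows
--                 })
--     return result
-- ===== SOURCE B (Python) =====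
-- def find_path_duplicates(paths):
--     groups = {}
--     max_length = 0
--     for i, path in enumerate(paths):
--         if len(path) > max_length:
--             max_length = len(path)
--         key = ()
--         for x in path:
--             key = key + (x,)
--             groups.setdefault(len(key), {}).setdefault(key, []).append(i)
--     result = []
--     for length in range(1, max_length + 1):
--         for key, rows in groups.get(length, {}).items():
--             if len(rows) > 1:
--                 result.append({'dup': list(key), 'row': rows})
--     return result
-- ===== Notes on version B (the rewrite author's own statement) =====
-- stated objective: alternative
-- what changed: A rescans and re-groups all paths once per prefix length (a fresh dict and fresh tuple slices per length); B makes ONE pass over the paths, filing every prefix of every path into a nested dict groups[len(prefix)][prefix] with incrementally built keys, then emits the duplicate groups per length directly from that structure.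
import Mathlib
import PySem

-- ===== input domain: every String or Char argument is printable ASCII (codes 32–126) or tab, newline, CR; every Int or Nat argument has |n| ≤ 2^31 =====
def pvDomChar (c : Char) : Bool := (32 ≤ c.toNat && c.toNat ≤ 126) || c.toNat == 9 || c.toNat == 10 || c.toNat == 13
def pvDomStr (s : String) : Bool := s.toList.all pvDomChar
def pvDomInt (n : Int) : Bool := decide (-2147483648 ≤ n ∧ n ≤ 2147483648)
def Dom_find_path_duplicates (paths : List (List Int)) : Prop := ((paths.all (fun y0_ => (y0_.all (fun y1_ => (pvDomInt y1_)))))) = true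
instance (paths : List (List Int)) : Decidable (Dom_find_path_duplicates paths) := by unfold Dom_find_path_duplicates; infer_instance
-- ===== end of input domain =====

-- B replaces A's per-length rescan of all paths (rebuilding a dict for every length) by ONE pass over the
-- paths that records every prefix in a single dict, followed by a per-length filter of that dict's entries.

-- ===== PORT A =====
def find_path_duplicates (paths : List (List Int)) : List (List (String × List Int)) :=
  -- result = []; max_length = max(len(path) for path in paths)
  match PySem.List.max? (paths.map (fun path => (path.length : Int))) (fun x => x) with
  | none => []   -- Python: max() raises ValueError on an empty sequence; excluded by Pre_
  | some max_length =>
    -- for length in range(1, max_length + 1):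
    (PySem.List.pyRange 1 (max_length + 1)).foldl (fun result length =>
      -- dup_dict = {}; for i, path in enumerate(paths): ...
      let dup_dict : PySem.Dict (List Int) (List Int) :=
        (PySem.List.enumerate paths).foldl (fun dup_dict ip =>
          if (ip.2.length : Int) ≥ length then
            let key := PySem.List.slice ip.2 none (some length)
            let dup_dict := if ¬ (dup_dict.contains key = true) then dup_dict.insert key [] else dup_dict
            dup_dict.modify key [] (fun rows => rows ++ [ip.1])   -- dup_dict[key].append(i)
          else dup_dict) (PySem.Dict.mk [])
      -- for key, rows in dup_dict.items(): if len(rows) > 1: result.append({'dup': ..., 'row': ...})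
      dup_dict.items.foldl (fun result kv =>
        if kv.2.length > 1 then result ++ [[("dup", kv.1), ("row", kv.2)]] else result) result) []

-- ===== PORT B =====
def find_path_duplicates_alt (paths : List (List Int)) : List (List (String × List Int)) :=
  -- ONE pass over the paths: groups[len(key)][key] collects the rows of every prefix; max_length kept alongside.
  -- groups.setdefault(len(key), {}).setdefault(key, []).append(i)  =  outer modify at len(key) applying an inner
  -- modify at key (setdefault-then-mutate-in-place = Dict.modify; the outer entry keeps its position)
  let st := (PySem.List.enumerate paths).foldl
    (fun (st : PySem.Dict Int (PySem.Dict (List Int) (List Int)) × Int) ip =>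
      ((ip.2.foldl (fun (s : List Int × PySem.Dict Int (PySem.Dict (List Int) (List Int))) x =>
          (s.1 ++ [x],
           s.2.modify (((s.1 ++ [x]).length : Int)) (PySem.Dict.mk [])
             (fun g => g.modify (s.1 ++ [x]) [] (fun rows => rows ++ [ip.1]))))
          (([] : List Int), st.1)).2,
       if (ip.2.length : Int) > st.2 then (ip.2.length : Int) else st.2))
    (PySem.Dict.mk [], 0)
  -- for length in range(1, max_length + 1): for key, rows in groups.get(length, {}).items(): ...
  (PySem.List.pyRange 1 (st.2 + 1)).foldl (fun result length =>
    (st.1.getD length (PySem.Dict.mk [])).items.foldl (fun result kv =>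
      if kv.2.length > 1 then result ++ [[("dup", kv.1), ("row", kv.2)]] else result) result) []

-- ===== PRECONDITION & SPEC =====
-- Pre_ excludes only the empty list, on which Python A raises ValueError (max() of an empty sequence).
def Pre_find_path_duplicates (paths : List (List Int)) : Prop := paths ≠ []
instance (paths : List (List Int)) : Decidable (Pre_find_path_duplicates paths) := by unfold Pre_find_path_duplicates; infer_instance
def pvWitness_find_path_duplicates : List (List Int) := [[1], [1, 2], [1]]

def Spec_find_path_duplicates (paths : List (List Int)) (out : List (List (String × List Int))) : Prop := out = find_path_duplicates_alt paths
instance (paths : List (List Int)) (out : List (List (String × List Int))) : Decidable (Spec_find_path_duplicates paths out) := by unfold Spec_find_path_duplicates; infer_instance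

-- ===== CLAIM (what is proved, stated in full; the proofs are below) =====
def Claim_equal_find_path_duplicates : Prop := ∀ (paths : List (List Int)), Dom_find_path_duplicates paths → Pre_find_path_duplicates paths → Spec_find_path_duplicates paths (find_path_duplicates paths)

-- ===== LEMMAS AND PROOFS =====

-- 'append row i under key k' — the common effect of A's "ensure key then append" and B's "setdefault().append"
def pvAddRow (i : Int) (d : PySem.Dict (List Int) (List Int)) (k : List Int) : PySem.Dict (List Int) (List Int) :=
  d.modify k [] (fun rows => rows ++ [i])

-- B's per-prefix update of the nested dict: file row i under groups[len k][k]
def pvAddPref (i : Int) (D : PySem.Dict Int (PySem.Dict (List Int) (List Int))) (k : List Int) :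
    PySem.Dict Int (PySem.Dict (List Int) (List Int)) :=
  D.modify ((k.length : Int)) (PySem.Dict.mk []) (fun g => pvAddRow i g k)

-- the prefixes (pre ++ [x1]), (pre ++ [x1, x2]), ... that B's inner loop visits
def pvPrefixes (pre : List Int) : List Int → List (List Int)
  | [] => []
  | x :: t => (pre ++ [x]) :: pvPrefixes (pre ++ [x]) t

theorem pvEnsureModify (d : PySem.Dict (List Int) (List Int)) (k : List Int) (i : Int) :
    (if ¬ (d.contains k = true) then d.insert k [] else d).modify k [] (fun rows => rows ++ [i]) = pvAddRow i d k := by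
  by_cases h : d.contains k = true
  · simp [h, pvAddRow]
  · simp [eq_false_of_ne_true h, pvAddRow, PySem.Dict.modify, PySem.Dict.getD_insert_self,
      PySem.Dict.insert_insert_self, PySem.Dict.getD_of_not_contains _ _ (eq_false_of_ne_true h)]

theorem pvEnumFoldSnd {α β : Type} (g : β → α → β) (xs : List α) : ∀ (s : Int) (a : β),
    (PySem.List.enumerate xs s).foldl (fun acc ip => g acc ip.2) a = xs.foldl g a := by
  induction xs with
  | nil => intro s a; rfl
  | cons x t ih => intro s a; simp only [PySem.List.enumerate, List.foldl_cons, ih]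

theorem pvMaxEq (q : List Int) (qs : List (List Int)) :
    PySem.List.max? ((q :: qs).map (fun path => (path.length : Int))) (fun x => x)
      = some (((q :: qs).map (fun path => (path.length : Int))).foldl (fun acc x => if x > acc then x else acc) 0) := by
  have h1 : ∀ (L : List Int) (a : Int), L.foldl (fun acc x => if x > acc then x else acc) a = L.foldl max a := by
    intro L
    induction L with
    | nil => intro a; rfl
    | cons x t ih => intro a; simp only [List.foldl_cons, ih]; congr 1; omega
  rw [List.map_cons, PySem.List.max?_id_cons, h1]
  simp only [List.foldl_cons]
  have : max 0 (q.length : Int) = (q.length : Int) := by omega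
  rw [this]

theorem pvInnerFold (i : Int) (p : List Int) : ∀ (pre : List Int) (D : PySem.Dict Int (PySem.Dict (List Int) (List Int))),
    (p.foldl (fun (s : List Int × PySem.Dict Int (PySem.Dict (List Int) (List Int))) x =>
        (s.1 ++ [x],
         s.2.modify (((s.1 ++ [x]).length : Int)) (PySem.Dict.mk [])
           (fun g => g.modify (s.1 ++ [x]) [] (fun rows => rows ++ [i])))) (pre, D)).2
      = (pvPrefixes pre p).foldl (fun D k => pvAddPref i D k) D := by
  induction p with
  | nil => intro pre D; rfl
  | cons x t ih => intro pre D; simp only [List.foldl_cons, pvPrefixes, ih, pvAddPref, pvAddRow]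

theorem pvGetDPref (l i : Int) (p : List Int) : ∀ (pre : List Int) (D : PySem.Dict Int (PySem.Dict (List Int) (List Int))),
    ((pvPrefixes pre p).foldl (fun D k => pvAddPref i D k) D).getD l (PySem.Dict.mk [])
      = if (pre.length : Int) < l ∧ l ≤ (pre.length : Int) + (p.length : Int)
        then pvAddRow i (D.getD l (PySem.Dict.mk [])) ((pre ++ p).take l.toNat)
        else D.getD l (PySem.Dict.mk []) := by
  induction p with
  | nil =>
    intro pre D
    rw [show pvPrefixes pre [] = [] from rfl, List.foldl_nil,
        if_neg (by simp only [List.length_nil, Nat.cast_zero]; omega)]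
  | cons x t ih =>
    intro pre D
    simp only [pvPrefixes, List.foldl_cons, ih (pre ++ [x])]
    have hkey : ((pre ++ [x]).length : Int) = (pre.length : Int) + 1 := by simp
    have hgd : ∀ l', (pvAddPref i D (pre ++ [x])).getD l' (PySem.Dict.mk [])
        = if l' = (pre.length : Int) + 1 then pvAddRow i (D.getD l' (PySem.Dict.mk [])) (pre ++ [x])
          else D.getD l' (PySem.Dict.mk []) := by
      intro l'
      rw [show pvAddPref i D (pre ++ [x])
            = D.modify (((pre ++ [x]).length : Int)) (PySem.Dict.mk []) (fun g => pvAddRow i g (pre ++ [x])) from rfl,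
          PySem.Dict.getD_modify, hkey]
      by_cases h : l' = (pre.length : Int) + 1
      · rw [if_pos h, if_pos h, h]
      · rw [if_neg h, if_neg h]
    by_cases hl : (pre.length : Int) + 1 = l
    · have hc1 : ¬ (((pre ++ [x]).length : Int) < l ∧ l ≤ ((pre ++ [x]).length : Int) + (t.length : Int)) := by
        rw [hkey]; omega
      have hc2 : ((pre.length : Int) < l ∧ l ≤ (pre.length : Int) + ((x :: t).length : Int)) := by
        simp only [List.length_cons]; push_cast; omega
      rw [if_neg hc1, if_pos hc2, hgd l, if_pos hl.symm]
      have he : (pre ++ x :: t).take l.toNat = pre ++ [x] := by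
        have hlen : l.toNat = pre.length + 1 := by omega
        rw [hlen, show pre ++ x :: t = (pre ++ [x]) ++ t by simp,
            List.take_append_of_le_length (by simp)]
        simp
      rw [he]
    · by_cases hc : ((pre.length : Int) < l ∧ l ≤ (pre.length : Int) + ((x :: t).length : Int))
      · have hc' : (((pre ++ [x]).length : Int) < l ∧ l ≤ ((pre ++ [x]).length : Int) + (t.length : Int)) := by
          rw [hkey]; rw [hkey] at *; simp only [List.length_cons] at hc; push_cast at hc ⊢; omega
        rw [if_pos hc', if_pos hc, hgd l, if_neg (fun h => hl h.symm)]
        simp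
      · have hc' : ¬ (((pre ++ [x]).length : Int) < l ∧ l ≤ ((pre ++ [x]).length : Int) + (t.length : Int)) := by
          rw [hkey]; simp only [List.length_cons] at hc; push_cast at hc ⊢; omega
        rw [if_neg hc', if_neg hc, hgd l, if_neg (fun h => hl h.symm)]

theorem pvDictEq (l : Int) (hl : 1 ≤ l) (es : List (Int × List Int)) :
    ∀ (D : PySem.Dict Int (PySem.Dict (List Int) (List Int))),
    (es.foldl (fun D ip => (pvPrefixes [] ip.2).foldl (fun D k => pvAddPref ip.1 D k) D) D).getD l (PySem.Dict.mk [])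
      = es.foldl (fun d ip => if l ≤ (ip.2.length : Int) then pvAddRow ip.1 d (ip.2.take l.toNat) else d)
          (D.getD l (PySem.Dict.mk [])) := by
  induction es with
  | nil => intro D; rfl
  | cons ip t ih =>
    intro D
    simp only [List.foldl_cons, ih, pvGetDPref l ip.1 ip.2 []]
    by_cases hc : l ≤ (ip.2.length : Int)
    · rw [if_pos (by simp only [List.length_nil, Nat.cast_zero]; omega), if_pos hc]
      simp
    · rw [if_neg (by simp only [List.length_nil, Nat.cast_zero]; omega), if_neg hc]

-- ===== VERDICT (by name: the statement is the Claim_ definition above) =====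
theorem find_path_duplicates_spec : Claim_equal_find_path_duplicates := by
  intro paths _ hpre
  unfold Spec_find_path_duplicates
  obtain ⟨q, qs, rfl⟩ : ∃ q qs, paths = q :: qs := by
    cases paths with
    | nil => exact absurd rfl hpre
    | cons q qs => exact ⟨q, qs, rfl⟩
  unfold find_path_duplicates find_path_duplicates_alt
  simp only [pvMaxEq q qs]
  rw [PySem.List.foldl_prod_mk
    (f := fun (g : PySem.Dict Int (PySem.Dict (List Int) (List Int))) (ip : Int × List Int) =>
      (ip.2.foldl (fun (s : List Int × PySem.Dict Int (PySem.Dict (List Int) (List Int))) x =>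
          (s.1 ++ [x],
           s.2.modify (((s.1 ++ [x]).length : Int)) (PySem.Dict.mk [])
             (fun g => g.modify (s.1 ++ [x]) [] (fun rows => rows ++ [ip.1])))) (([] : List Int), g)).2)
    (g := fun (m : Int) (ip : Int × List Int) => if (ip.2.length : Int) > m then (ip.2.length : Int) else m)]
  simp only
  -- the two max computations coincide
  rw [pvEnumFoldSnd (fun m (p : List Int) => if (p.length : Int) > m then (p.length : Int) else m) (q :: qs) 0,
      List.foldl_map]
  -- B's big dict: each path's inner loop walks its prefixes
  rw [PySem.List.foldl_congr_mem (PySem.List.enumerate (q :: qs))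
    (fun g ip =>
      (ip.2.foldl (fun (s : List Int × PySem.Dict Int (PySem.Dict (List Int) (List Int))) x =>
          (s.1 ++ [x],
           s.2.modify (((s.1 ++ [x]).length : Int)) (PySem.Dict.mk [])
             (fun g => g.modify (s.1 ++ [x]) [] (fun rows => rows ++ [ip.1])))) (([] : List Int), g)).2)
    (fun g ip => (pvPrefixes [] ip.2).foldl (fun D k => pvAddPref ip.1 D k) g)
    (PySem.Dict.mk [])
    (fun g ip _ => pvInnerFold ip.1 ip.2 [] g)]
  -- compare the two outer loops over lengths pointwise
  apply PySem.List.foldl_congr_mem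
  intro acc l hl
  have h1l : (1 : Int) ≤ l := (PySem.List.mem_pyRange_one.mp hl).1
  -- A's per-length dict, canonicalised step by step
  rw [PySem.List.foldl_congr_mem (PySem.List.enumerate (q :: qs))
    (fun dup_dict (ip : Int × List Int) =>
      if (ip.2.length : Int) ≥ l then
        (if ¬ (dup_dict.contains (PySem.List.slice ip.2 none (some l)) = true)
          then dup_dict.insert (PySem.List.slice ip.2 none (some l)) [] else dup_dict).modify
          (PySem.List.slice ip.2 none (some l)) [] (fun rows => rows ++ [ip.1])
      else dup_dict)
    (fun dup_dict (ip : Int × List Int) =>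
      if l ≤ (ip.2.length : Int) then pvAddRow ip.1 dup_dict (ip.2.take l.toNat) else dup_dict)
    (PySem.Dict.mk [])
    (fun dd ip _ => by
      beta_reduce
      by_cases hc : l ≤ (ip.2.length : Int)
      · rw [if_pos hc, if_pos hc, PySem.List.slice_to ip.2 (by omega), pvEnsureModify]
      · rw [if_neg hc, if_neg hc])]
  rw [pvDictEq l h1l (PySem.List.enumerate (q :: qs)) (PySem.Dict.mk [])]
  rfl
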